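-- pv_equiv track=rewrite | github.com/Chopinsky/algo-problems | challenges/3999/3681-maximum-xor-of-subsequences.py | maxXorSubsequences
-- ===== SOURCE A (Python) =====
-- from typing import List
--
-- def maxXorSubsequences(nums: List[int]) -> int:
--   bs = []
--   for val in nums:
--     for b in bs:
--       val = min(val , val^b)
--
--     if val > 0:
--       bs.append(val)
--       bs.sort(reverse=True)
--
--   maxVal = 0
--   for b in bs:
--     maxVal = max(maxVal , maxVal^b)
--
--   return maxVal
-- ===== SOURCE B (Python) =====
-- def maxXorSubsequences(nums):
--     # Recursive column-major elimination: recurse over bit positions, partitioning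
--     # the remaining values by the current bit; no basis is ever stored and the
--     # answer accumulator is updated inline.
--     def best(acc, vals, bit):
--         if bit < 0 or not vals:
--             return acc
--         ones = [v for v in vals if (v >> bit) & 1]
--         zeros = [v for v in vals if not ((v >> bit) & 1)]
--         if not ones:
--             return best(acc, zeros, bit - 1)
--         p = ones[0]
--         rest = zeros + [v ^ p for v in ones[1:]]
--         if not ((acc >> bit) & 1):
--             acc ^= p
--         return best(acc, rest, bit - 1)
--     return best(0, [v for v in nums if v > 0], 31)
-- ===== Notes on version B (the rewrite author's own statement) =====
-- stated objective: alternative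
-- what changed: Replaces A's incremental sorted-list basis (reduce each value against every stored basis element, append, re-sort, then a second greedy pass over the basis) with a recursive column-major elimination over bit positions 31..0 that partitions the remaining values by the current bit, folds the pivot into the answer accumulator inline, and never stores a basis or runs a second pass.
import Mathlib
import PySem

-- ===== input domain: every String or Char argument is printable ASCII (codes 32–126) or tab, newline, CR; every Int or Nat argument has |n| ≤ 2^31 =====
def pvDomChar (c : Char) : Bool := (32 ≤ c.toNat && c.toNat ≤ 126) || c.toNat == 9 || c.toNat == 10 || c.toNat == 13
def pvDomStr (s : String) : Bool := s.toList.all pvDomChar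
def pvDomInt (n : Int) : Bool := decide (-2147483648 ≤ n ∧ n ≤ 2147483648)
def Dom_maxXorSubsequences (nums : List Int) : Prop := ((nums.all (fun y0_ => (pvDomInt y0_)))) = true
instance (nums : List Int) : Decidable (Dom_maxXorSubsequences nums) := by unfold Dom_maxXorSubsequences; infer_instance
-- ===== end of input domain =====

-- B replaces A's incremental sorted-list basis (+ second greedy pass) by a recursive
-- column-major elimination over bit positions that partitions the remaining values by
-- the current bit and folds the pivot into the answer inline; alternative algorithm,
-- same exact results.

-- ===== PORT A =====
def maxXorSubsequences (nums : List Int) : Int :=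
  let bs := nums.foldl (fun bs val =>
    let val := bs.foldl (fun val b => min val (PySem.Int.bxor val b)) val
    if val > 0 then PySem.List.sorted (bs ++ [val]) (fun x => x) true else bs) []
  bs.foldl (fun maxVal b => max maxVal (PySem.Int.bxor maxVal b)) 0

-- ===== PORT B =====
-- `(v >> bit) & 1` is ported as `PySem.Int.band (v >>> bit.toNat) 1`: the recursion only
-- shifts while bit ≥ 0, so `.toNat` is exact; Python's truthiness of `(v >> bit) & 1`
-- (a value in {0,1}) is `== 1`.
def bestB (acc : Int) (vals : List Int) (bit : Int) : Int :=
  if bit < 0 ∨ vals = [] then acc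
  else
    let ones := vals.filter (fun (v : Int) => PySem.Int.band (v >>> bit.toNat) 1 == 1)
    let zeros := vals.filter (fun (v : Int) => !(PySem.Int.band (v >>> bit.toNat) 1 == 1))
    match ones with
    | [] => bestB acc zeros (bit - 1)
    | p :: rest1 =>
      bestB (if !(PySem.Int.band (acc >>> bit.toNat) 1 == 1) then PySem.Int.bxor acc p else acc)
            (zeros ++ rest1.map (fun v => PySem.Int.bxor v p)) (bit - 1)
termination_by (bit + 1).toNat
decreasing_by all_goals (rename_i h; rw [not_or] at h; omega)

def maxXorSubsequences_alt (nums : List Int) : Int :=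
  bestB 0 (nums.filter (fun v => decide (0 < v))) 31

-- ===== PRECONDITION & SPEC =====
def Spec_maxXorSubsequences (nums : List Int) (out : Int) : Prop := out = maxXorSubsequences_alt nums
instance (nums : List Int) (out : Int) : Decidable (Spec_maxXorSubsequences nums out) := by unfold Spec_maxXorSubsequences; infer_instance

-- ===== CLAIM (what is proved, stated in full; the proofs are below) =====
def Claim_equal_maxXorSubsequences : Prop := ∀ (nums : List Int), Dom_maxXorSubsequences nums → Spec_maxXorSubsequences nums (maxXorSubsequences nums)

-- ===== LEMMAS AND PROOFS =====

-- xor helpers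
lemma xor_lc (a b c : Nat) : a ^^^ (b ^^^ c) = b ^^^ (a ^^^ c) := by
  rw [← Nat.xor_assoc, Nat.xor_comm a b, Nat.xor_assoc]

lemma xor_cancel (a x : Nat) : a ^^^ (a ^^^ x) = x := by
  rw [← Nat.xor_assoc, Nat.xor_self, Nat.zero_xor]

-- NSpan L x : x is the xor of some sub-multiset of L (the GF(2) span of L)
def NSpan : List Nat → Nat → Prop
  | [], x => x = 0
  | a :: l, x => NSpan l x ∨ NSpan l (a ^^^ x)

lemma nspan_nil {x : Nat} : NSpan [] x ↔ x = 0 := Iff.rfl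

lemma nspan_cons {a : Nat} {l : List Nat} {x : Nat} :
    NSpan (a :: l) x ↔ NSpan l x ∨ NSpan l (a ^^^ x) := Iff.rfl

lemma nspan_zero : ∀ (l : List Nat), NSpan l 0
  | [] => rfl
  | _ :: l => Or.inl (nspan_zero l)

lemma nspan_xor : ∀ (l : List Nat) {u v : Nat}, NSpan l u → NSpan l v → NSpan l (u ^^^ v) := by
  intro l
  induction l with
  | nil =>
    intro u v hu hv
    rw [nspan_nil] at *
    subst hu; subst hv; rfl
  | cons a t ih =>
    intro u v hu hv
    rcases hu with hu | hu <;> rcases hv with hv | hv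
    · exact Or.inl (ih hu hv)
    · refine Or.inr ?_
      have h := ih hu hv
      have e : a ^^^ (u ^^^ v) = u ^^^ (a ^^^ v) := xor_lc a u v
      rw [e]; exact h
    · refine Or.inr ?_
      have h := ih hu hv
      have e : a ^^^ (u ^^^ v) = (a ^^^ u) ^^^ v := by rw [Nat.xor_assoc]
      rw [e]; exact h
    · refine Or.inl ?_
      have h := ih hu hv
      have e : (a ^^^ u) ^^^ (a ^^^ v) = u ^^^ v := by
        rw [Nat.xor_assoc, xor_lc u a v, xor_cancel]
      rw [← e]; exact h

lemma nspan_mem : ∀ {l : List Nat} {a : Nat}, a ∈ l → NSpan l a := by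
  intro l
  induction l with
  | nil => intro a ha; simp at ha
  | cons b t ih =>
    intro a ha
    rcases List.mem_cons.mp ha with rfl | ha
    · exact Or.inr (by simpa [Nat.xor_self] using nspan_zero t)
    · exact Or.inl (ih ha)

lemma nspan_mono : ∀ {M N : List Nat}, (∀ v ∈ M, NSpan N v) → ∀ {x : Nat}, NSpan M x → NSpan N x := by
  intro M
  induction M with
  | nil =>
    intro N h x hx
    rw [nspan_nil] at hx; subst hx; exact nspan_zero N
  | cons m t ih =>
    intro N h x hx
    rcases hx with hx | hx
    · exact ih (fun v hv => h v (List.mem_cons_of_mem _ hv)) hx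
    · have h1 : NSpan N (m ^^^ x) := ih (fun v hv => h v (List.mem_cons_of_mem _ hv)) hx
      have h2 : NSpan N m := h m List.mem_cons_self
      have h3 := nspan_xor N h2 h1
      rwa [xor_cancel] at h3

lemma nspan_equiv_of_mem {M N : List Nat} (hMN : ∀ v ∈ M, NSpan N v)
    (hNM : ∀ v ∈ N, NSpan M v) (x : Nat) : NSpan M x ↔ NSpan N x :=
  ⟨fun h => nspan_mono hMN h, fun h => nspan_mono hNM h⟩

lemma nspan_perm_iff {M N : List Nat} (h : M.Perm N) (x : Nat) : NSpan M x ↔ NSpan N x :=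
  nspan_equiv_of_mem (fun v hv => nspan_mem (h.mem_iff.mp hv))
    (fun v hv => nspan_mem (h.mem_iff.mpr hv)) x

lemma nspan_bound {k : Nat} : ∀ {l : List Nat}, (∀ v ∈ l, v < 2 ^ k) →
    ∀ {x : Nat}, NSpan l x → x < 2 ^ k := by
  intro l
  induction l with
  | nil =>
    intro _ x hx
    rw [nspan_nil] at hx; subst hx; exact Nat.two_pow_pos k
  | cons a t ih =>
    intro h x hx
    rcases hx with hx | hx
    · exact ih (fun v hv => h v (List.mem_cons_of_mem _ hv)) hx
    · have h1 : a ^^^ x < 2 ^ k := ih (fun v hv => h v (List.mem_cons_of_mem _ hv)) hx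
      have h2 : a < 2 ^ k := h a List.mem_cons_self
      have h3 : a ^^^ (a ^^^ x) < 2 ^ k := Nat.xor_lt_two_pow h2 h1
      rwa [xor_cancel] at h3

-- comparison of two xor branches that differ at bit k and agree above it
lemma branch_lt {x y s t : Nat} (k : Nat) (hx : x.testBit k = true) (hy : y.testBit k = false)
    (hagree : ∀ j, k < j → x.testBit j = y.testBit j) (hs : s < 2 ^ k) (ht : t < 2 ^ k) :
    y ^^^ t < x ^^^ s := by
  apply Nat.lt_of_testBit k
  · simp [Nat.testBit_xor, hy, Nat.testBit_lt_two_pow ht]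
  · simp [Nat.testBit_xor, hx, Nat.testBit_lt_two_pow hs]
  · intro j hj
    have hsj : s < 2 ^ j := lt_of_lt_of_le hs (Nat.pow_le_pow_right (by norm_num) hj.le)
    have htj : t < 2 ^ j := lt_of_lt_of_le ht (Nat.pow_le_pow_right (by norm_num) hj.le)
    simp [Nat.testBit_xor, Nat.testBit_lt_two_pow hsj, Nat.testBit_lt_two_pow htj, hagree j hj]

-- MaxOf L acc m : m = acc ^^^ s for some s in the span of L, and is the largest such value
def MaxOf (L : List Nat) (acc m : Nat) : Prop :=
  (∃ s, NSpan L s ∧ m = acc ^^^ s) ∧ (∀ s, NSpan L s → acc ^^^ s ≤ m)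

lemma maxof_congr {L L' : List Nat} {acc m : Nat} (h : ∀ x, NSpan L x ↔ NSpan L' x)
    (hm : MaxOf L acc m) : MaxOf L' acc m := by
  obtain ⟨⟨s, hs, he⟩, hub⟩ := hm
  exact ⟨⟨s, (h s).mp hs, he⟩, fun s' hs' => hub s' ((h s').mpr hs')⟩

lemma maxof_zero_span {L : List Nat} (h : ∀ s, NSpan L s → s = 0) (acc : Nat) :
    MaxOf L acc acc := by
  refine ⟨⟨0, nspan_zero L, by simp⟩, fun s hs => ?_⟩
  rw [h s hs]; simp

lemma maxof_unique {L : List Nat} {acc m₁ m₂ : Nat} (h1 : MaxOf L acc m₁)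
    (h2 : MaxOf L acc m₂) : m₁ = m₂ := by
  obtain ⟨⟨s1, hs1, e1⟩, u1⟩ := h1
  obtain ⟨⟨s2, hs2, e2⟩, u2⟩ := h2
  exact le_antisymm (e1 ▸ u2 s1 hs1) (e2 ▸ u1 s2 hs2)

-- the pivot step shared by both programs: a pivot p with top bit k, the rest spanning below 2^k
lemma maxof_pivot {L : List Nat} {p k : Nat} (hp : p.testBit k = true) (hpb : p < 2 ^ (k + 1))
    (hL : ∀ v, NSpan L v → v < 2 ^ k) (acc : Nat) {m : Nat}
    (h : MaxOf L (if acc.testBit k then acc else acc ^^^ p) m) : MaxOf (p :: L) acc m := by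
  set acc' := if acc.testBit k then acc else acc ^^^ p with hacc'
  have hpj : ∀ j, k < j → p.testBit j = false := fun j hj =>
    Nat.testBit_lt_two_pow (lt_of_lt_of_le hpb (Nat.pow_le_pow_right (by norm_num) hj))
  have hacc'k : acc'.testBit k = true := by
    by_cases hb : acc.testBit k <;> simp [hacc', hb, Nat.testBit_xor, hp]
  have hagree : ∀ j, k < j → acc'.testBit j = acc.testBit j := by
    intro j hj
    by_cases hb : acc.testBit k <;> simp [hacc', hb, Nat.testBit_xor, hpj j hj]
  obtain ⟨⟨sm, hsm, hm⟩, hub⟩ := h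
  constructor
  · by_cases hb : acc.testBit k
    · refine ⟨sm, Or.inl hsm, ?_⟩
      rw [hm, hacc', if_pos hb]
    · refine ⟨p ^^^ sm, Or.inr (by rwa [xor_cancel]), ?_⟩
      rw [hm, hacc', if_neg hb, Nat.xor_assoc]
  · intro s hs
    rcases hs with hs | hs
    · -- s itself is in the span of L
      by_cases hb : acc.testBit k
      · have := hub s hs
        rwa [hacc', if_pos hb] at this
      · apply le_of_lt
        rw [hm]
        have hyk : acc.testBit k = false := by simpa using hb
        exact branch_lt k hacc'k hyk (fun j hj => hagree j hj) (hL sm hsm) (hL s hs)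
    · -- s = p ^^^ s0 with s0 := p ^^^ s in the span of L
      have hs0 : NSpan L (p ^^^ s) := hs
      have he : acc ^^^ s = (acc ^^^ p) ^^^ (p ^^^ s) := by
        rw [Nat.xor_assoc, xor_cancel]
      by_cases hb : acc.testBit k
      · apply le_of_lt
        rw [hm, he]
        have hyk : (acc ^^^ p).testBit k = false := by simp [Nat.testBit_xor, hb, hp]
        have hag : ∀ j, k < j → acc'.testBit j = (acc ^^^ p).testBit j := by
          intro j hj
          rw [hagree j hj]; simp [Nat.testBit_xor, hpj j hj]
        exact branch_lt k hacc'k hyk hag (hL sm hsm) (hL _ hs0)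
      · have hb' : acc' = acc ^^^ p := by rw [hacc', if_neg hb]
        rw [he, ← hb']
        exact hub _ hs0

-- ---- leading-bit machinery (shared with the A-side invariants) ----

def lbN (b : Int) : Nat := PySem.Int.bitLength b - 1

lemma bitLength_pos {b : Int} (hb : 0 < b) : 1 ≤ PySem.Int.bitLength b := by
  by_contra h
  have h0 : PySem.Int.bitLength b = 0 := by omega
  have := PySem.Int.lt_two_pow_bitLength b
  rw [h0] at this
  simp at this
  omega

lemma two_pow_lbN_le {b : Int} (hb : 0 < b) : 2 ^ lbN b ≤ b.toNat := by
  have := PySem.Int.two_pow_bitLength_le b (by omega)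
  unfold lbN
  omega

lemma lt_two_pow_lbN {b : Int} (hb : 0 < b) : b.toNat < 2 ^ (lbN b + 1) := by
  have h := PySem.Int.lt_two_pow_bitLength b
  have h1 := bitLength_pos hb
  have : lbN b + 1 = PySem.Int.bitLength b := by unfold lbN; omega
  rw [this]
  omega

lemma testBit_lbN_self {b : Int} (hb : 0 < b) : b.toNat.testBit (lbN b) = true := by
  have h1 := two_pow_lbN_le hb
  have h2 := lt_two_pow_lbN hb
  rw [Nat.testBit_eq_decide_div_mod_eq]
  have hd : b.toNat / 2 ^ lbN b = 1 := by
    rw [Nat.div_eq_iff (by positivity)]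
    constructor
    · omega
    · rw [pow_succ] at h2; omega
  simp [hd]

lemma testBit_of_lbN_lt {b : Int} (hb : 0 < b) {j : Nat} (hj : lbN b < j) :
    b.toNat.testBit j = false := by
  apply Nat.testBit_lt_two_pow
  have h2 := lt_two_pow_lbN hb
  calc b.toNat < 2 ^ (lbN b + 1) := h2
    _ ≤ 2 ^ j := Nat.pow_le_pow_right (by norm_num) (by omega)

lemma val_lt_of_lbN_lt {a b : Int} (ha : 0 < a) (hb : 0 < b) (h : lbN b < lbN a) : b < a := by
  have h1 := two_pow_lbN_le ha
  have h2 := lt_two_pow_lbN hb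
  have : (2:Nat) ^ (lbN b + 1) ≤ 2 ^ lbN a := Nat.pow_le_pow_right (by norm_num) (by omega)
  omega

lemma nat_band_test (x k : Nat) : ((x >>> k) &&& 1 = 1) ↔ x.testBit k = true := by
  rw [Nat.and_one_is_mod, Nat.testBit_eq_decide_div_mod_eq, Nat.shiftRight_eq_div_pow]
  simp

lemma band_test_eq {w : Int} (hw : 0 ≤ w) (k : Nat) :
    (PySem.Int.band (w >>> k) 1 = 1) ↔ w.toNat.testBit k = true := by
  obtain ⟨x, rfl⟩ := Int.eq_ofNat_of_zero_le hw
  have hs : ((x:Int) >>> k) = ((x >>> k : Nat) : Int) := by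
    simp [Int.shiftRight_eq, Int.natCast_shiftRight]
  rw [hs]
  have hb : PySem.Int.band ((x >>> k : Nat) : Int) 1 = (((x >>> k) &&& 1 : Nat) : Int) := by
    exact_mod_cast PySem.Int.band_natCast (x >>> k) 1
  rw [hb, Int.toNat_natCast, ← nat_band_test x k]
  exact_mod_cast Iff.rfl

lemma bxor_nonneg {w b : Int} (hw : 0 ≤ w) (hb : 0 ≤ b) : 0 ≤ PySem.Int.bxor w b := by
  rw [PySem.Int.bxor_of_nonneg hw hb]
  exact Int.natCast_nonneg _

lemma lt_pow_of_testBit_false {x k : Nat} (h1 : x < 2 ^ (k + 1)) (h2 : x.testBit k = false) :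
    x < 2 ^ k := by
  rw [Nat.testBit_eq_decide_div_mod_eq] at h2
  have hpos : 0 < 2 ^ k := Nat.two_pow_pos k
  have h3 : x / 2 ^ k < 2 := by
    rw [Nat.div_lt_iff_lt_mul hpos]
    rw [pow_succ] at h1
    omega
  have h4 : ¬ (x / 2 ^ k % 2 = 1) := by simpa using h2
  have h5 : x / 2 ^ k = 0 := by
    generalize x / 2 ^ k = q at h3 h4
    omega
  exact Nat.lt_of_div_eq_zero hpos h5

-- min/max with a xor against a positive value: decided by the value's leading bit
lemma xor_lt_of_testBit {x y : Nat} (h1 : 2 ^ (lbN (y:Int)) ≤ y) (h2 : y < 2 ^ (lbN (y:Int) + 1))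
    (hy : y.testBit (lbN (y:Int)) = true)
    (hx : x.testBit (lbN (y:Int)) = true) : x ^^^ y < x := by
  apply Nat.lt_of_testBit (lbN (y:Int))
  · simp [Nat.testBit_xor, hx, hy]
  · exact hx
  · intro j hj
    have : y.testBit j = false := Nat.testBit_lt_two_pow (by
      calc y < 2 ^ (lbN (y:Int) + 1) := h2
        _ ≤ 2 ^ j := Nat.pow_le_pow_right (by norm_num) (by omega))
    simp [Nat.testBit_xor, this]

lemma minxor_eq {w b : Int} (hw : 0 ≤ w) (hb : 0 < b) :
    min w (PySem.Int.bxor w b)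
      = if w.toNat.testBit (lbN b) then PySem.Int.bxor w b else w := by
  have hxor := PySem.Int.bxor_of_nonneg hw (le_of_lt hb)
  have htop := testBit_lbN_self hb
  have h1 := two_pow_lbN_le hb
  have h2 := lt_two_pow_lbN hb
  have hbn : ((b.toNat : Int)) = b := Int.toNat_of_nonneg (le_of_lt hb)
  by_cases ht : w.toNat.testBit (lbN b)
  · simp only [ht, if_pos]
    rw [hxor]
    have hlt : w.toNat ^^^ b.toNat < w.toNat := by
      have : lbN ((b.toNat : Int)) = lbN b := by rw [hbn]
      exact xor_lt_of_testBit (by rw [this]; exact h1) (by rw [this]; exact h2)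
        (by rw [this]; exact htop) (by rw [this]; exact ht)
    have : ((w.toNat ^^^ b.toNat : Nat) : Int) < w := by
      calc ((w.toNat ^^^ b.toNat : Nat) : Int) < (w.toNat : Int) := by exact_mod_cast hlt
        _ = w := Int.toNat_of_nonneg hw
    omega
  · simp only [ht, if_neg, Bool.false_eq_true, not_false_iff]
    rw [hxor]
    have hlt : w.toNat < w.toNat ^^^ b.toNat := by
      apply Nat.lt_of_testBit (lbN b)
      · simpa using ht
      · simp [Nat.testBit_xor, htop]; simpa using ht
      · intro j hj
        have : b.toNat.testBit j = false := testBit_of_lbN_lt hb hj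
        simp [Nat.testBit_xor, this]
    have : w < ((w.toNat ^^^ b.toNat : Nat) : Int) := by
      calc w = (w.toNat : Int) := (Int.toNat_of_nonneg hw).symm
        _ < _ := by exact_mod_cast hlt
    omega

lemma maxxor_eq {w b : Int} (hw : 0 ≤ w) (hb : 0 < b) :
    max w (PySem.Int.bxor w b)
      = if w.toNat.testBit (lbN b) then w else PySem.Int.bxor w b := by
  have hxor := PySem.Int.bxor_of_nonneg hw (le_of_lt hb)
  have htop := testBit_lbN_self hb
  have hag : ∀ j, lbN b < j → (w.toNat ^^^ b.toNat).testBit j = w.toNat.testBit j := by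
    intro j hj
    simp [Nat.testBit_xor, testBit_of_lbN_lt hb hj]
  by_cases ht : w.toNat.testBit (lbN b)
  · rw [if_pos ht]
    apply max_eq_left
    have hlt : w.toNat ^^^ b.toNat < w.toNat :=
      Nat.lt_of_testBit (lbN b) (by simp [Nat.testBit_xor, ht, htop]) ht (fun j hj => hag j hj)
    have h0 := Int.toNat_of_nonneg hw
    rw [hxor]
    omega
  · rw [if_neg (by simpa using ht)]
    apply max_eq_right
    have htf : w.toNat.testBit (lbN b) = false := by simpa using ht
    have hlt : w.toNat < w.toNat ^^^ b.toNat :=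
      Nat.lt_of_testBit (lbN b) htf (by simp [Nat.testBit_xor, htf, htop])
        (fun j hj => (hag j hj).symm)
    have h0 := Int.toNat_of_nonneg hw
    rw [hxor]
    omega

-- ---- properties of A's reduction fold ----

lemma reduce_le (bs : List Int) (v : Int) :
    bs.foldl (fun w b => min w (PySem.Int.bxor w b)) v ≤ v := by
  induction bs generalizing v with
  | nil => simp
  | cons b t ih =>
    simp only [List.foldl_cons]
    calc t.foldl (fun w b => min w (PySem.Int.bxor w b)) (min v (PySem.Int.bxor v b))
        ≤ min v (PySem.Int.bxor v b) := ih _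
      _ ≤ v := min_le_left _ _

lemma reduce_nonneg {bs : List Int} (hbs : ∀ b ∈ bs, 0 < b) {v : Int} (hv : 0 ≤ v) :
    0 ≤ bs.foldl (fun w b => min w (PySem.Int.bxor w b)) v := by
  induction bs generalizing v with
  | nil => simpa
  | cons b t ih =>
    simp only [List.foldl_cons]
    apply ih (fun x hx => hbs x (List.mem_cons_of_mem _ hx))
    have := bxor_nonneg hv (le_of_lt (hbs b (List.mem_cons_self)))
    omega

lemma reduce_testBit_high {bs : List Int} {m : Nat} (hbs : ∀ b ∈ bs, 0 < b ∧ lbN b < m)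
    {v : Int} (hv : 0 ≤ v) :
    (bs.foldl (fun w b => min w (PySem.Int.bxor w b)) v).toNat.testBit m = v.toNat.testBit m := by
  induction bs generalizing v with
  | nil => simp
  | cons b t ih =>
    simp only [List.foldl_cons]
    obtain ⟨hb0, hbm⟩ := hbs b List.mem_cons_self
    have hxn := bxor_nonneg hv (le_of_lt hb0)
    rw [ih (fun x hx => hbs x (List.mem_cons_of_mem _ hx)) (by omega : (0:Int) ≤ min v (PySem.Int.bxor v b))]
    rcases min_cases v (PySem.Int.bxor v b) with ⟨h, _⟩ | ⟨h, _⟩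
    · rw [h]
    · rw [h, PySem.Int.bxor_of_nonneg hv (le_of_lt hb0), Int.toNat_natCast, Nat.testBit_xor,
        testBit_of_lbN_lt hb0 hbm]
      simp

def GoodBs (bs : List Int) : Prop :=
  (∀ b ∈ bs, 0 < b ∧ b ≤ 2 ^ 31) ∧ bs.Pairwise (fun a b => lbN b < lbN a)

lemma reduce_clears_aux : ∀ (bs : List Int), (∀ b ∈ bs, 0 < b) →
    bs.Pairwise (fun a b => lbN b < lbN a) → ∀ (v : Int), 0 ≤ v →
    ∀ b ∈ bs, (bs.foldl (fun w b => min w (PySem.Int.bxor w b)) v).toNat.testBit (lbN b) = false := by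
  intro bs
  induction bs with
  | nil => simp
  | cons b t ih =>
    intro hpos hpair v hv x hx
    simp only [List.foldl_cons]
    have hb0 := hpos b List.mem_cons_self
    have hxn : (0:Int) ≤ min v (PySem.Int.bxor v b) := by
      have := bxor_nonneg hv (le_of_lt hb0); omega
    rcases List.mem_cons.mp hx with rfl | hxt
    · have hlt : ∀ y ∈ t, 0 < y ∧ lbN y < lbN x := by
        intro y hy
        exact ⟨hpos y (List.mem_cons_of_mem _ hy), (List.pairwise_cons.mp hpair).1 y hy⟩
      rw [reduce_testBit_high hlt hxn]
      rcases min_cases v (PySem.Int.bxor v x) with ⟨h, hle⟩ | ⟨h, hlt'⟩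
      · rw [h]
        by_contra hc
        have ht : v.toNat.testBit (lbN x) = true := by simpa using hc
        have := minxor_eq hv hb0
        rw [ht, if_pos rfl] at this
        have : min v (PySem.Int.bxor v x) = PySem.Int.bxor v x := this
        rw [h] at this
        have hxn2 := bxor_nonneg hv (le_of_lt hb0)
        have : v.toNat.testBit (lbN x) = (PySem.Int.bxor v x).toNat.testBit (lbN x) := by rw [← this]
        rw [PySem.Int.bxor_of_nonneg hv (le_of_lt hb0), Int.toNat_natCast, Nat.testBit_xor,
          testBit_lbN_self hb0, ht] at this
        simp at this
      · rw [h, PySem.Int.bxor_of_nonneg hv (le_of_lt hb0), Int.toNat_natCast, Nat.testBit_xor,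
          testBit_lbN_self hb0]
        have hm := minxor_eq hv hb0
        by_cases ht : v.toNat.testBit (lbN x)
        · simp [ht]
        · rw [if_neg (by simpa using ht)] at hm
          omega
    · exact ih (fun y hy => (hpos y (List.mem_cons_of_mem _ hy))) (List.pairwise_cons.mp hpair).2
        _ hxn x hxt

lemma reduce_clears {bs : List Int} (hg : GoodBs bs) {v : Int} (hv : 0 ≤ v) :
    ∀ b ∈ bs, (bs.foldl (fun w b => min w (PySem.Int.bxor w b)) v).toNat.testBit (lbN b) = false :=
  reduce_clears_aux bs (fun b hb => (hg.1 b hb).1) hg.2 v hv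

-- NSpan relation produced by the reduction: the result differs from v by a span element
lemma reduce_span : ∀ (bs : List Int) (v : Int), 0 ≤ v → (∀ b ∈ bs, 0 < b) →
    NSpan (bs.map Int.toNat)
      (v.toNat ^^^ (bs.foldl (fun w b => min w (PySem.Int.bxor w b)) v).toNat) := by
  intro bs
  induction bs with
  | nil =>
    intro v _ _
    simp [NSpan]
  | cons b t ih =>
    intro v hv hpos
    have hb0 := hpos b List.mem_cons_self
    simp only [List.foldl_cons, List.map_cons]
    rcases min_cases v (PySem.Int.bxor v b) with ⟨h, _⟩ | ⟨h, _⟩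
    · rw [h]
      exact Or.inl (ih v hv (fun y hy => hpos y (List.mem_cons_of_mem _ hy)))
    · rw [h]
      refine Or.inr ?_
      have hv' : 0 ≤ PySem.Int.bxor v b := bxor_nonneg hv (le_of_lt hb0)
      have ihh := ih (PySem.Int.bxor v b) hv' (fun y hy => hpos y (List.mem_cons_of_mem _ hy))
      have he : (PySem.Int.bxor v b).toNat = v.toNat ^^^ b.toNat := by
        rw [PySem.Int.bxor_of_nonneg hv (le_of_lt hb0), Int.toNat_natCast]
      rw [he] at ihh
      have e : b.toNat ^^^ (v.toNat ^^^
          (t.foldl (fun w b => min w (PySem.Int.bxor w b)) (PySem.Int.bxor v b)).toNat)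
          = (v.toNat ^^^ b.toNat) ^^^
          (t.foldl (fun w b => min w (PySem.Int.bxor w b)) (PySem.Int.bxor v b)).toNat := by
        rw [← Nat.xor_assoc, Nat.xor_comm b.toNat v.toNat]
      rw [e]
      exact ihh

-- ---- insertion into the sorted basis list ----

def insDesc (v : Int) : List Int → List Int
  | [] => [v]
  | b :: t => if lbN v < lbN b then b :: insDesc v t else v :: b :: t

lemma insDesc_perm (v : Int) (bs : List Int) : (insDesc v bs).Perm (bs ++ [v]) := by
  induction bs with
  | nil => simp [insDesc]
  | cons b t ih =>
    unfold insDesc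
    by_cases h : lbN v < lbN b
    · rw [if_pos h]
      simpa using List.Perm.cons b ih
    · rw [if_neg h]
      calc (v :: b :: t).Perm (b :: t ++ [v]) := by
            simpa using List.perm_append_singleton v (b :: t) |>.symm
        _ = _ := rfl

lemma mem_insDesc {v x : Int} {bs : List Int} (h : x ∈ insDesc v bs) : x = v ∨ x ∈ bs := by
  have := (insDesc_perm v bs).mem_iff.mp h
  simp at this
  tauto

lemma insDesc_pairwise {v : Int} {bs : List Int} (hpair : bs.Pairwise (fun a b => lbN b < lbN a))
    (hfresh : ∀ b ∈ bs, lbN v ≠ lbN b) :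
    (insDesc v bs).Pairwise (fun a b => lbN b < lbN a) := by
  induction bs with
  | nil => simp [insDesc]
  | cons b t ih =>
    obtain ⟨hhd, htl⟩ := List.pairwise_cons.mp hpair
    unfold insDesc
    by_cases h : lbN v < lbN b
    · rw [if_pos h]
      rw [List.pairwise_cons]
      constructor
      · intro y hy
        rcases mem_insDesc hy with rfl | hyt
        · exact h
        · exact hhd y hyt
      · exact ih htl (fun y hy => hfresh y (List.mem_cons_of_mem _ hy))
    · rw [if_neg h]
      have hne := hfresh b List.mem_cons_self
      have hvb : lbN b < lbN v := by omega
      rw [List.pairwise_cons]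
      refine ⟨fun y hy => ?_, hpair⟩
      rcases List.mem_cons.mp hy with rfl | hyt
      · exact hvb
      · have := hhd y hyt; omega

lemma sorted_append_eq {v : Int} {bs : List Int} (hg : GoodBs bs) (hv : 0 < v)
    (hfresh : ∀ b ∈ bs, lbN v ≠ lbN b) :
    PySem.List.sorted (bs ++ [v]) (fun x => x) true = insDesc v bs := by
  apply PySem.List.sorted_rev_eq_of_perm_of_pairwise_gt
  · exact insDesc_perm v bs
  · have hp := insDesc_pairwise hg.2 hfresh
    have hpos : ∀ x ∈ insDesc v bs, 0 < x := by
      intro x hx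
      rcases mem_insDesc hx with rfl | hxb
      · exact hv
      · exact (hg.1 x hxb).1
    refine hp.imp_of_mem ?_
    intro a b ha hb hlt
    exact val_lt_of_lbN_lt (hpos a ha) (hpos b hb) hlt

-- ---- A's first loop: the basis stays Good and spans exactly the positive inputs so far ----

lemma phase1 : ∀ (nums bs : List Int) (L : List Nat),
    (nums.all (fun y0_ => pvDomInt y0_)) = true → GoodBs bs →
    (∀ x, NSpan (bs.map Int.toNat) x ↔ NSpan L x) →
    GoodBs (nums.foldl (fun bs val =>
        let val := bs.foldl (fun val b => min val (PySem.Int.bxor val b)) val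
        if val > 0 then PySem.List.sorted (bs ++ [val]) (fun x => x) true else bs) bs)
    ∧ (∀ x, NSpan ((nums.foldl (fun bs val =>
        let val := bs.foldl (fun val b => min val (PySem.Int.bxor val b)) val
        if val > 0 then PySem.List.sorted (bs ++ [val]) (fun x => x) true else bs) bs).map Int.toNat) x
        ↔ NSpan ((nums.filter (fun v => decide (0 < v))).map Int.toNat ++ L) x) := by
  intro nums
  induction nums with
  | nil =>
    intro bs L _ hg hL
    simpa using ⟨hg, hL⟩
  | cons v rest ih =>
    intro bs L hdom hg hL
    rw [List.all_cons, Bool.and_eq_true] at hdom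
    have hv : -2147483648 ≤ v ∧ v ≤ 2147483648 := by
      have := hdom.1
      simpa [pvDomInt] using this
    simp only [List.foldl_cons]
    by_cases hv0 : 0 < v
    · -- v is kept in the filtered list
      have hvnn : (0:Int) ≤ v := le_of_lt hv0
      set r := bs.foldl (fun w b => min w (PySem.Int.bxor w b)) v with hr
      have hrnn : 0 ≤ r := reduce_nonneg (fun b hb => (hg.1 b hb).1) hvnn
      have hrle : r ≤ v := reduce_le bs v
      have hsp : NSpan (bs.map Int.toNat) (v.toNat ^^^ r.toNat) :=
        reduce_span bs v hvnn (fun b hb => (hg.1 b hb).1)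
      have hfilter : (v :: rest).filter (fun v => decide (0 < v)) =
          v :: rest.filter (fun v => decide (0 < v)) := by
        simp [List.filter_cons, hv0]
      by_cases hrpos : r > 0
      · -- r joins the basis
        have hfresh : ∀ b ∈ bs, lbN r ≠ lbN b := by
          intro b hb he
          have hc := reduce_clears hg hvnn b hb
          rw [← hr, ← he] at hc
          rw [testBit_lbN_self hrpos] at hc
          exact absurd hc (by simp)
        have hsorted := sorted_append_eq hg hrpos hfresh
        have hstep : (if (bs.foldl (fun val b => min val (PySem.Int.bxor val b)) v) > 0
            then PySem.List.sorted (bs ++ [bs.foldl (fun val b => min val (PySem.Int.bxor val b)) v]) (fun x => x) true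
            else bs) = insDesc r bs := by
          rw [← hr, if_pos hrpos, hsorted]
        rw [hstep]
        -- new basis is Good
        have hg' : GoodBs (insDesc r bs) := by
          constructor
          · intro b hb
            rcases mem_insDesc hb with heq | hbb
            · rw [heq]
              exact ⟨hrpos, by
                calc r ≤ v := hrle
                  _ ≤ 2147483648 := hv.2
                  _ = 2 ^ 31 := by norm_num⟩
            · exact hg.1 b hbb
          · exact insDesc_pairwise hg.2 hfresh
        -- new basis spans v :: L
        have hrmem : r.toNat ∈ (insDesc r bs).map Int.toNat :=
          List.mem_map_of_mem ((insDesc_perm r bs).mem_iff.mpr (by simp))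
        have hsub : ∀ u, NSpan (bs.map Int.toNat) u → NSpan ((insDesc r bs).map Int.toNat) u := by
          intro u hu
          refine nspan_mono ?_ hu
          intro w hw
          obtain ⟨b, hb, rfl⟩ := List.mem_map.mp hw
          exact nspan_mem (List.mem_map_of_mem ((insDesc_perm r bs).mem_iff.mpr (by simp [hb])))
        have hL' : ∀ x, NSpan ((insDesc r bs).map Int.toNat) x ↔ NSpan (v.toNat :: L) x := by
          intro x
          apply nspan_equiv_of_mem
          · intro w hw
            obtain ⟨b, hb, rfl⟩ := List.mem_map.mp hw
            rcases mem_insDesc hb with heq | hbb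
            · -- b = r : its toNat differs from v by a span element of L
              rw [heq]
              exact Or.inr ((hL _).mp hsp)
            · exact Or.inl ((hL _).mp (nspan_mem (List.mem_map_of_mem hbb)))
          · intro w hw
            rcases List.mem_cons.mp hw with rfl | hwL
            · -- v = r ^^^ (v ^^^ r)
              have h1 : NSpan ((insDesc r bs).map Int.toNat) r.toNat := nspan_mem hrmem
              have h2 : NSpan ((insDesc r bs).map Int.toNat) (v.toNat ^^^ r.toNat) := hsub _ hsp
              have h3 := nspan_xor _ h1 h2
              rwa [xor_lc, Nat.xor_self, Nat.xor_zero] at h3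
            · exact hsub _ ((hL _).mpr (nspan_mem hwL))
        obtain ⟨hgf, hLf⟩ := ih (insDesc r bs) (v.toNat :: L) hdom.2 hg' hL'
        refine ⟨hgf, fun x => ?_⟩
        rw [hLf x, hfilter]
        simp only [List.map_cons]
        exact (nspan_perm_iff List.perm_middle x)
      · -- r ≤ 0 but v > 0: v is already in the span, basis unchanged
        have hstep : (if (bs.foldl (fun val b => min val (PySem.Int.bxor val b)) v) > 0
            then PySem.List.sorted (bs ++ [bs.foldl (fun val b => min val (PySem.Int.bxor val b)) v]) (fun x => x) true
            else bs) = bs := by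
          rw [← hr, if_neg hrpos]
        rw [hstep]
        have hr0 : r = 0 := by omega
        have hvsp : NSpan (bs.map Int.toNat) v.toNat := by
          have := hsp
          rw [hr0] at this
          simpa using this
        have hL' : ∀ x, NSpan (bs.map Int.toNat) x ↔ NSpan (v.toNat :: L) x := by
          intro x
          rw [nspan_cons]
          constructor
          · intro h
            exact Or.inl ((hL _).mp h)
          · intro h
            rcases h with h | h
            · exact (hL _).mpr h
            · have h2 := nspan_xor _ hvsp ((hL _).mpr h)
              rwa [xor_cancel] at h2
        obtain ⟨hgf, hLf⟩ := ih bs (v.toNat :: L) hdom.2 hg hL'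
        refine ⟨hgf, fun x => ?_⟩
        rw [hLf x, hfilter]
        simp only [List.map_cons]
        exact (nspan_perm_iff List.perm_middle x)
    · -- v ≤ 0 : reduced value stays ≤ 0, nothing changes
      have hvle : v ≤ 0 := by omega
      have hrle : bs.foldl (fun w b => min w (PySem.Int.bxor w b)) v ≤ v := reduce_le bs v
      have hstep : (if (bs.foldl (fun val b => min val (PySem.Int.bxor val b)) v) > 0
          then PySem.List.sorted (bs ++ [bs.foldl (fun val b => min val (PySem.Int.bxor val b)) v]) (fun x => x) true
          else bs) = bs := by
        rw [if_neg (by omega)]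
      rw [hstep]
      have hfilter : (v :: rest).filter (fun v => decide (0 < v)) =
          rest.filter (fun v => decide (0 < v)) := by
        simp [List.filter_cons, hv0]
      obtain ⟨hgf, hLf⟩ := ih bs L hdom.2 hg hL
      rw [hfilter]
      exact ⟨hgf, hLf⟩

-- ---- A's second loop computes the span maximum of its basis ----

lemma greedyA : ∀ (bs : List Int), (∀ b ∈ bs, 0 < b) →
    bs.Pairwise (fun a b => lbN b < lbN a) → ∀ (acc : Int), 0 ≤ acc →
    0 ≤ bs.foldl (fun maxVal b => max maxVal (PySem.Int.bxor maxVal b)) acc ∧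
    MaxOf (bs.map Int.toNat) acc.toNat
      (bs.foldl (fun maxVal b => max maxVal (PySem.Int.bxor maxVal b)) acc).toNat := by
  intro bs
  induction bs with
  | nil =>
    intro _ _ acc hacc
    exact ⟨hacc, maxof_zero_span (fun s hs => by simpa [nspan_nil] using hs) acc.toNat⟩
  | cons b t ih =>
    intro hpos hpair acc hacc
    have hb0 := hpos b List.mem_cons_self
    simp only [List.foldl_cons, List.map_cons]
    set acc' := max acc (PySem.Int.bxor acc b) with hacc'
    have hacc'0 : 0 ≤ acc' := le_trans hacc (le_max_left _ _)
    have hacc'N : acc'.toNat =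
        if acc.toNat.testBit (lbN b) then acc.toNat else acc.toNat ^^^ b.toNat := by
      rw [hacc', maxxor_eq hacc hb0]
      by_cases ht : acc.toNat.testBit (lbN b)
      · rw [if_pos ht, if_pos ht]
      · rw [if_neg ht, if_neg ht, PySem.Int.bxor_of_nonneg hacc (le_of_lt hb0), Int.toNat_natCast]
    obtain ⟨hres0, hmax⟩ := ih (fun y hy => hpos y (List.mem_cons_of_mem _ hy))
      (List.pairwise_cons.mp hpair).2 acc' hacc'0
    refine ⟨hres0, ?_⟩
    apply maxof_pivot (testBit_lbN_self hb0) (lt_two_pow_lbN hb0)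
    · intro w hw
      apply nspan_bound (l := t.map Int.toNat) ?_ hw
      intro y hy
      obtain ⟨y', hy', rfl⟩ := List.mem_map.mp hy
      have hy0 := hpos y' (List.mem_cons_of_mem _ hy')
      have hlb := (List.pairwise_cons.mp hpair).1 y' hy'
      calc y'.toNat < 2 ^ (lbN y' + 1) := lt_two_pow_lbN hy0
        _ ≤ 2 ^ lbN b := Nat.pow_le_pow_right (by norm_num) (by omega)
    · rw [← hacc'N]
      exact hmax

-- ---- B's recursion computes the span maximum of its remaining values ----

lemma bestB_spec : ∀ (n : Nat) (bit : Int), bit = (n : Int) - 1 →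
    ∀ (vals : List Int) (acc : Int), 0 ≤ acc →
    (∀ v ∈ vals, 0 ≤ v ∧ v.toNat < 2 ^ n) →
    0 ≤ bestB acc vals bit ∧
    MaxOf (vals.map Int.toNat) acc.toNat (bestB acc vals bit).toNat := by
  intro n
  induction n with
  | zero =>
    intro bit hbit vals acc hacc hvals
    have hbit' : bit = -1 := by omega
    subst hbit'
    rw [bestB, if_pos (Or.inl (by norm_num))]
    refine ⟨hacc, maxof_zero_span ?_ acc.toNat⟩
    intro s hs
    have : s < 2 ^ 0 := by
      apply nspan_bound (l := vals.map Int.toNat) ?_ hs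
      intro y hy
      obtain ⟨y', hy', rfl⟩ := List.mem_map.mp hy
      exact (hvals y' hy').2
    omega
  | succ n ihn =>
    intro bit hbit vals acc hacc hvals
    have hbit' : bit = (n : Int) := by push_cast at hbit; omega
    subst hbit'
    have hbnn : ¬ ((n : Int) < 0) := by omega
    by_cases hvnil : vals = []
    · subst hvnil
      rw [bestB, if_pos (Or.inr rfl)]
      exact ⟨hacc, maxof_zero_span (fun s hs => by simpa [nspan_nil] using hs) acc.toNat⟩
    · rw [bestB, if_neg (by simp [hbnn, hvnil])]
      have htn : ((n : Int)).toNat = n := Int.toNat_natCast n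
      -- the bit predicate equals testBit n on nonnegative values
      have hQ : ∀ v ∈ vals, ((PySem.Int.band (v >>> ((n : Int)).toNat) 1 == 1) = true)
          ↔ v.toNat.testBit n = true := by
        intro v hv
        rw [htn, beq_iff_eq]
        exact band_test_eq (hvals v hv).1 n
      rcases hone : vals.filter (fun (v : Int) => PySem.Int.band (v >>> ((n : Int)).toNat) 1 == 1)
        with _ | ⟨p, rest1⟩
      · -- no value has bit n: zeros = vals, recurse
        simp only [hone]
        have hall : ∀ v ∈ vals, ¬ ((PySem.Int.band (v >>> ((n : Int)).toNat) 1 == 1) = true) := by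
          intro v hv
          exact (List.filter_eq_nil_iff.mp hone) v hv
        have hzeros : vals.filter (fun (v : Int) => !(PySem.Int.band (v >>> ((n : Int)).toNat) 1 == 1))
            = vals := by
          apply List.filter_eq_self.mpr
          intro v hv
          simpa using hall v hv
        rw [hzeros]
        apply ihn ((n : Int) - 1) rfl vals acc hacc
        intro v hv
        refine ⟨(hvals v hv).1, ?_⟩
        apply lt_pow_of_testBit_false (hvals v hv).2
        by_contra hc
        exact hall v hv ((hQ v hv).mpr (by simpa using hc))
      · -- pivot p with bit n set
        simp only [hone]
        have hpin : p ∈ vals.filter (fun (v : Int) => PySem.Int.band (v >>> ((n : Int)).toNat) 1 == 1) := by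
          rw [hone]; exact List.mem_cons_self
        have hrest1 : ∀ v ∈ rest1,
            v ∈ vals.filter (fun (v : Int) => PySem.Int.band (v >>> ((n : Int)).toNat) 1 == 1) := by
          intro v hv
          rw [hone]; exact List.mem_cons_of_mem _ hv
        have hpv : p ∈ vals := (List.mem_filter.mp hpin).1
        have hp0 : 0 ≤ p := (hvals p hpv).1
        have hpk : p.toNat.testBit n = true := (hQ p hpv).mp (List.mem_filter.mp hpin).2
        have hpb : p.toNat < 2 ^ (n + 1) := (hvals p hpv).2
        set zeros := vals.filter (fun (v : Int) => !(PySem.Int.band (v >>> ((n : Int)).toNat) 1 == 1))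
          with hzeros
        set rest := zeros ++ rest1.map (fun v => PySem.Int.bxor v p) with hrest
        set acc2 := if !(PySem.Int.band (acc >>> ((n : Int)).toNat) 1 == 1)
          then PySem.Int.bxor acc p else acc with hacc2
        have hacc20 : 0 ≤ acc2 := by
          rw [hacc2]
          split
          · exact bxor_nonneg hacc hp0
          · exact hacc
        have hacc2N : acc2.toNat =
            if acc.toNat.testBit n then acc.toNat else acc.toNat ^^^ p.toNat := by
          rw [hacc2, htn]
          by_cases ht : acc.toNat.testBit n
          · rw [if_pos ht]
            have : (PySem.Int.band (acc >>> n) 1 == 1) = true := by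
              rw [beq_iff_eq]; exact (band_test_eq hacc n).mpr ht
            simp [this]
          · rw [if_neg ht]
            have : (PySem.Int.band (acc >>> n) 1 == 1) = false := by
              rw [beq_eq_false_iff_ne]
              intro hc
              exact ht ((band_test_eq hacc n).mp hc)
            simp [this, PySem.Int.bxor_of_nonneg hacc hp0]
        -- bounds for the recursive call
        have hrestb : ∀ v ∈ rest, 0 ≤ v ∧ v.toNat < 2 ^ n := by
          intro v hv
          rw [hrest] at hv
          rcases List.mem_append.mp hv with hv | hv
          · have hv' := List.mem_filter.mp hv
            have h0 := (hvals v hv'.1).1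
            refine ⟨h0, lt_pow_of_testBit_false (hvals v hv'.1).2 ?_⟩
            by_contra hc
            have h1 : v.toNat.testBit n = true := by simpa using hc
            have h2 := (hQ v hv'.1).mpr h1
            rw [h2] at hv'
            simp at hv'
          · obtain ⟨w, hw, rfl⟩ := List.mem_map.mp hv
            have hwv := (List.mem_filter.mp (hrest1 w hw)).1
            have hw0 := (hvals w hwv).1
            have hwk : w.toNat.testBit n = true := (hQ w hwv).mp (List.mem_filter.mp (hrest1 w hw)).2
            refine ⟨bxor_nonneg hw0 hp0, ?_⟩
            rw [PySem.Int.bxor_of_nonneg hw0 hp0, Int.toNat_natCast]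
            apply lt_pow_of_testBit_false (Nat.xor_lt_two_pow (hvals w hwv).2 hpb)
            simp [Nat.testBit_xor, hwk, hpk]
        obtain ⟨hres0, hmax⟩ := ihn ((n : Int) - 1) rfl rest acc2 hacc20 hrestb
        refine ⟨hres0, ?_⟩
        have hpiv : MaxOf (p.toNat :: rest.map Int.toNat) acc.toNat
            (bestB acc2 rest ((n : Int) - 1)).toNat := by
          apply maxof_pivot hpk hpb
          · intro w hw
            apply nspan_bound (l := rest.map Int.toNat) ?_ hw
            intro y hy
            obtain ⟨y', hy', rfl⟩ := List.mem_map.mp hy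
            exact (hrestb y' hy').2
          · rw [← hacc2N]
            exact hmax
        apply maxof_congr ?_ hpiv
        -- the spans of (p :: rest) and vals coincide
        intro x
        apply nspan_equiv_of_mem
        · -- every element of p :: rest is in the span of vals
          intro w hw
          rcases List.mem_cons.mp hw with rfl | hw
          · exact nspan_mem (List.mem_map_of_mem hpv)
          · obtain ⟨v, hv, rfl⟩ := List.mem_map.mp hw
            rw [hrest] at hv
            rcases List.mem_append.mp hv with hv | hv
            · exact nspan_mem (List.mem_map_of_mem (List.mem_filter.mp hv).1)
            · obtain ⟨u, hu, rfl⟩ := List.mem_map.mp hv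
              have huv := (List.mem_filter.mp (hrest1 u hu)).1
              have hu0 := (hvals u huv).1
              have he : (PySem.Int.bxor u p).toNat = u.toNat ^^^ p.toNat := by
                rw [PySem.Int.bxor_of_nonneg hu0 hp0, Int.toNat_natCast]
              rw [he]
              exact nspan_xor _ (nspan_mem (List.mem_map_of_mem huv))
                (nspan_mem (List.mem_map_of_mem hpv))
        · -- every element of vals is in the span of p :: rest
          intro w hw
          obtain ⟨v, hv, rfl⟩ := List.mem_map.mp hw
          by_cases hQv : (PySem.Int.band (v >>> ((n : Int)).toNat) 1 == 1) = true
          · have hvone : v ∈ vals.filter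
                (fun (v : Int) => PySem.Int.band (v >>> ((n : Int)).toNat) 1 == 1) :=
              List.mem_filter.mpr ⟨hv, hQv⟩
            rw [hone] at hvone
            rcases List.mem_cons.mp hvone with rfl | hvr
            · exact nspan_mem List.mem_cons_self
            · -- v = p ^^^ (v ^^^ p)
              have hv0 := (hvals v hv).1
              have hmemx : (PySem.Int.bxor v p).toNat ∈ rest.map Int.toNat := by
                apply List.mem_map_of_mem
                rw [hrest]
                exact List.mem_append.mpr (Or.inr (List.mem_map_of_mem hvr))
              have he : (PySem.Int.bxor v p).toNat = v.toNat ^^^ p.toNat := by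
                rw [PySem.Int.bxor_of_nonneg hv0 hp0, Int.toNat_natCast]
              have h1 : NSpan (p.toNat :: rest.map Int.toNat) (v.toNat ^^^ p.toNat) := by
                rw [← he]
                exact nspan_mem (List.mem_cons_of_mem _ hmemx)
              have h2 : NSpan (p.toNat :: rest.map Int.toNat) p.toNat :=
                nspan_mem List.mem_cons_self
              have h3 := nspan_xor _ h2 h1
              rwa [xor_lc, Nat.xor_self, Nat.xor_zero] at h3
          · have hvz : v ∈ zeros := by
              rw [hzeros]
              exact List.mem_filter.mpr ⟨hv, by simpa using hQv⟩
            apply nspan_mem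
            apply List.mem_cons_of_mem
            apply List.mem_map_of_mem
            rw [hrest]
            exact List.mem_append.mpr (Or.inl hvz)

-- ===== VERDICT (by name: the statement is the Claim_ definition above) =====
theorem maxXorSubsequences_spec : Claim_equal_maxXorSubsequences := by
  intro nums hdom
  unfold Spec_maxXorSubsequences
  rw [Dom_maxXorSubsequences] at hdom
  show (nums.foldl (fun bs val =>
      let val := bs.foldl (fun val b => min val (PySem.Int.bxor val b)) val
      if val > 0 then PySem.List.sorted (bs ++ [val]) (fun x => x) true else bs) []).foldl
      (fun maxVal b => max maxVal (PySem.Int.bxor maxVal b)) 0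
    = bestB 0 (nums.filter (fun v => decide (0 < v))) 31
  obtain ⟨hg, hspan⟩ := phase1 nums [] [] hdom ⟨by simp, by simp⟩ (fun x => Iff.rfl)
  obtain ⟨hA0, hAmax⟩ := greedyA _ (fun b hb => (hg.1 b hb).1) hg.2 0 le_rfl
  have hAmax' : MaxOf ((nums.filter (fun v => decide (0 < v))).map Int.toNat) (0:Int).toNat
      ((nums.foldl (fun bs val =>
        let val := bs.foldl (fun val b => min val (PySem.Int.bxor val b)) val
        if val > 0 then PySem.List.sorted (bs ++ [val]) (fun x => x) true else bs) []).foldl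
        (fun maxVal b => max maxVal (PySem.Int.bxor maxVal b)) 0).toNat := by
    apply maxof_congr ?_ hAmax
    intro x
    rw [hspan x, List.append_nil]
  have hBbound : ∀ v ∈ nums.filter (fun v => decide (0 < v)), 0 ≤ v ∧ v.toNat < 2 ^ 32 := by
    intro v hv
    obtain ⟨hvn, hvp⟩ := List.mem_filter.mp hv
    have hvp' : 0 < v := by simpa using hvp
    have hdomv : pvDomInt v = true := by
      have := List.all_eq_true.mp hdom v hvn
      simpa using this
    have hvb : v ≤ 2147483648 := by
      simp [pvDomInt] at hdomv
      exact hdomv.2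
    refine ⟨le_of_lt hvp', ?_⟩
    have h32 : (2:Nat) ^ 32 = 4294967296 := by norm_num
    omega
  obtain ⟨hB0, hBmax⟩ := bestB_spec 32 31 (by norm_num)
    (nums.filter (fun v => decide (0 < v))) 0 le_rfl hBbound
  have := maxof_unique hAmax' hBmax
  omega
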